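-- pv_equiv track=rewrite | github.com/bonasoobin/Practice | 프로그래머스/2/42626. 더 맵게/더 맵게.py | solution
-- ===== SOURCE A (Python) =====
-- import heapq
--
-- def solution(scoville, K):
--     answer = 0
--     heapq.heapify(scoville)
--
--     while scoville[0] < K:
--         if len(scoville) < 2:
--             return -1
--
--         a = heapq.heappop(scoville)
--         b = heapq.heappop(scoville)
--
--         new = a + (b*2)
--
--         heapq.heappush(scoville, new)
--
--         answer += 1
--
--     return answer
-- ===== SOURCE B (Python) =====
-- def solution(scoville, K):
--     # Sorted-list version: keep the pot explicitly sorted; mutates scoville (sorted order) like A mutates it (heap order).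
--     scoville.sort()
--     answer = 0
--     while scoville[0] < K:
--         if len(scoville) < 2:
--             return -1
--         a = scoville.pop(0)
--         b = scoville.pop(0)
--         new = a + b * 2
--         i = 0
--         while i < len(scoville) and scoville[i] < new:
--             i += 1
--         scoville.insert(i, new)
--         answer += 1
--     return answer
-- ===== Notes on version B (the rewrite author's own statement) =====
-- stated objective: alternative
-- what changed: Replaces the binary heap (heapq heapify/heappop/heappush) by an explicitly sorted list: sort once, pop the two smallest from the front and re-insert the mix at its sorted position by a linear scan; trades the heap's O(n log n) for a plainer O(n^2) structure.
import Mathlib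
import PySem

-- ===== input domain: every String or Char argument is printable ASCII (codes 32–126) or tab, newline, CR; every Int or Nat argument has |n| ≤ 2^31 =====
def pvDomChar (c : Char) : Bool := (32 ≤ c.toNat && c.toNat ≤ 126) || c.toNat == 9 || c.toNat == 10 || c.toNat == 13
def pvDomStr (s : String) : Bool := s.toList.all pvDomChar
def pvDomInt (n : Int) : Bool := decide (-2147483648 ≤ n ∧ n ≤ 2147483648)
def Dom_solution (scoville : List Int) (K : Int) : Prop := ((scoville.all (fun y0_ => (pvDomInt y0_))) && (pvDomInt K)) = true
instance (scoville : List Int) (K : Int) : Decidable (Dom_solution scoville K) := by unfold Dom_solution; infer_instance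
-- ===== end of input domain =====

-- B replaces A's binary heap (heapq) by an explicitly sorted list (sort once, pop the two
-- smallest at the front, re-insert the mix by a linear scan).  Equivalence is about the
-- RETURN value only: both Pythons mutate `scoville` in place (heap order vs sorted order).

-- ===== PORT A =====
-- A calls heapq; its heapify/heappop/heappush are ported below as the standard binary
-- min-heap on a list (exact on return values: each heappop yields the minimum).
def hGet (h : List Int) (i : Nat) : Int := h.getD i 0

def hSwap (h : List Int) (i j : Nat) : List Int := (h.set i (hGet h j)).set j (hGet h i)

def siftDown (h : List Int) (i : Nat) : List Int :=
  if h1 : 2*i+1 < h.length then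
    if 2*i+2 < h.length ∧ hGet h (2*i+2) < hGet h (2*i+1) then
      if hGet h (2*i+2) < hGet h i then siftDown (hSwap h i (2*i+2)) (2*i+2) else h
    else
      if hGet h (2*i+1) < hGet h i then siftDown (hSwap h i (2*i+1)) (2*i+1) else h
  else h
termination_by h.length - i
decreasing_by all_goals (simp only [hSwap, List.length_set]; omega)

def siftUp (h : List Int) (i : Nat) : List Int :=
  if 0 < i ∧ hGet h i < hGet h ((i-1)/2) then siftUp (hSwap h ((i-1)/2) i) ((i-1)/2) else h
termination_by i
decreasing_by omega

def heapifyAux : List Int → Nat → List Int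
  | h, 0 => h
  | h, i+1 => heapifyAux (siftDown h i) i

def heapify (h : List Int) : List Int := heapifyAux h (h.length / 2)

def heappush (h : List Int) (x : Int) : List Int := siftUp (h ++ [x]) h.length

def heappop (h : List Int) : Int × List Int :=
  let last := hGet h (h.length - 1)
  let rest := h.dropLast
  if rest.isEmpty then (last, [])
  else (hGet rest 0, siftDown (rest.set 0 last) 0)

-- fuel = current heap length is always enough: every iteration shrinks the heap by one
def loopA (K : Int) : Nat → List Int → Int → Int
  | 0, _, ans => ans
  | fuel+1, h, ans =>
    if hGet h 0 < K then
      if h.length < 2 then -1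
      else
        let p1 := heappop h
        let p2 := heappop p1.2
        loopA K fuel (heappush p2.2 (p1.1 + p2.1 * 2)) (ans + 1)
    else ans

def solution (scoville : List Int) (K : Int) : Int :=
  loopA K scoville.length (heapify scoville) 0

-- ===== PORT B =====
-- linear-scan insertion into the sorted pot (Source B's index loop + insert)
def insSorted (x : Int) : List Int → List Int
  | [] => [x]
  | y :: ys => if y < x then y :: insSorted x ys else x :: y :: ys

def loopB (K : Int) : Nat → List Int → Int → Int
  | 0, _, ans => ans
  | fuel+1, s, ans =>
    if s.getD 0 0 < K then
      if s.length < 2 then -1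
      else
        match s with
        | a :: b :: rest => loopB K fuel (insSorted (a + b * 2) rest) (ans + 1)
        | _ => -1
    else ans

def solution_alt (scoville : List Int) (K : Int) : Int :=
  loopB K scoville.length (PySem.List.sorted scoville (fun x => x) false) 0

-- ===== PRECONDITION & SPEC =====
-- Pre_ excludes only the empty list, on which both Pythons raise IndexError at scoville[0].
def Pre_solution (scoville : List Int) (K : Int) : Prop := scoville ≠ []
instance (scoville : List Int) (K : Int) : Decidable (Pre_solution scoville K) := by unfold Pre_solution; infer_instance

def pvWitness_solution : List Int × Int := ([1, 2, 3, 9, 10, 12], 7)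

def Spec_solution (scoville : List Int) (K : Int) (out : Int) : Prop := out = solution_alt scoville K
instance (scoville : List Int) (K : Int) (out : Int) : Decidable (Spec_solution scoville K out) := by unfold Spec_solution; infer_instance

-- ===== CLAIM (what is proved, stated in full; the proofs are below) =====
def Claim_equal_solution : Prop := ∀ (scoville : List Int) (K : Int), Dom_solution scoville K → Pre_solution scoville K → Spec_solution scoville K (solution scoville K)

-- ===== LEMMAS AND PROOFS =====

-- ---- descendant relation on heap indices ----
def desc (i j : Nat) : Prop :=
  if j ≤ i then j = i else desc i ((j-1)/2)
termination_by j
decreasing_by omega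

theorem desc_refl (i : Nat) : desc i i := by rw [desc]; simp

theorem desc_le {i j : Nat} (h : desc i j) : i ≤ j := by
  rw [desc] at h
  split at h
  · omega
  · omega

theorem desc_parent {i j : Nat} (h : desc i j) (hne : j ≠ i) : desc i ((j-1)/2) := by
  rw [desc] at h
  split at h
  · omega
  · exact h

theorem desc_child_left (i : Nat) : desc i (2*i+1) := by
  rw [desc]
  have : ¬ (2*i+1 ≤ i) := by omega
  simp only [this, if_false]
  have : (2*i+1-1)/2 = i := by omega
  rw [this]; exact desc_refl i

theorem desc_child_right (i : Nat) : desc i (2*i+2) := by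
  rw [desc]
  have : ¬ (2*i+2 ≤ i) := by omega
  simp only [this, if_false]
  have : (2*i+2-1)/2 = i := by omega
  rw [this]; exact desc_refl i

theorem desc_trans {i c : Nat} (h1 : desc i c) : ∀ j, desc c j → desc i j := by
  intro j
  induction j using Nat.strong_induction_on with
  | _ j ih =>
    intro h2
    by_cases hjc : j = c
    · subst hjc; exact h1
    · have hp := desc_parent h2 hjc
      have hcj : c ≤ j := desc_le h2
      have hic : i ≤ c := desc_le h1
      have hj1 : 1 ≤ j := by omega
      rw [desc]
      have hji : ¬ j ≤ i := by omega
      simp only [hji, if_false]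
      exact ih ((j-1)/2) (by omega) hp

theorem desc_zero (j : Nat) : desc 0 j := by
  induction j using Nat.strong_induction_on with
  | _ j ih =>
    rw [desc]
    by_cases hj : j ≤ 0
    · simp [hj]; omega
    · simp only [hj, if_false]
      exact ih ((j-1)/2) (by omega)

-- parity: every index ≥ 1 is the left or right child of its parent
theorem child_parity {j : Nat} (hj : 1 ≤ j) : j = 2*((j-1)/2)+1 ∨ j = 2*((j-1)/2)+2 := by omega

theorem desc_linear {a b : Nat} : ∀ j, desc a j → desc b j → desc a b ∨ desc b a := by
  intro j
  induction j using Nat.strong_induction_on with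
  | _ j ih =>
    intro ha hb
    by_cases hja : j = a
    · subst hja; exact Or.inr hb
    · by_cases hjb : j = b
      · subst hjb; exact Or.inl ha
      · have h1 := desc_parent ha hja
        have h2 := desc_parent hb hjb
        have hle : a ≤ j := desc_le ha
        have hj1 : 1 ≤ j := by omega
        exact ih ((j-1)/2) (by omega) h1 h2

theorem not_desc_sibling_lr (i : Nat) : ¬ desc (2*i+1) (2*i+2) := by
  intro h
  have h2 := desc_parent h (by omega)
  have : (2*i+2-1)/2 = i := by omega
  rw [this] at h2
  have := desc_le h2
  omega

theorem not_desc_sibling_rl (i : Nat) : ¬ desc (2*i+2) (2*i+1) := by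
  intro h
  have := desc_le h
  omega

theorem desc_cases {i : Nat} : ∀ j, desc i j → j ≠ i →
    desc (2*i+1) j ∨ desc (2*i+2) j := by
  intro j
  induction j using Nat.strong_induction_on with
  | _ j ih =>
    intro h hne
    have hp := desc_parent h hne
    have hij : i ≤ j := desc_le h
    have hj1 : 1 ≤ j := by omega
    by_cases hpe : (j-1)/2 = i
    · rcases child_parity hj1 with hc | hc
      · left; rw [hpe] at hc; rw [hc]; exact desc_refl _
      · right; rw [hpe] at hc; rw [hc]; exact desc_refl _
    · rcases ih ((j-1)/2) (by omega) hp hpe with hc | hc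
      · left
        have hcle := desc_le hc
        rw [desc]
        have hx : ¬ (j ≤ 2*i+1) := by omega
        simp only [hx, if_false]
        exact hc
      · right
        have hcle := desc_le hc
        rw [desc]
        have hx : ¬ (j ≤ 2*i+2) := by omega
        simp only [hx, if_false]
        exact hc

-- ---- heap-shape predicates ----
def nodeOk (h : List Int) (p : Nat) : Prop :=
  (2*p+1 < h.length → hGet h p ≤ hGet h (2*p+1)) ∧
  (2*p+2 < h.length → hGet h p ≤ hGet h (2*p+2))

def goodAt (h : List Int) (i : Nat) : Prop := ∀ j, desc i j → j < h.length → nodeOk h j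

def Good (h : List Int) : Prop := ∀ j, j < h.length → nodeOk h j

-- ---- getD / swap basics ----
theorem hGet_set_eq {h : List Int} {i : Nat} (hi : i < h.length) (v : Int) :
    hGet (h.set i v) i = v := by
  simp [hGet, List.getD, hi]

theorem hGet_set_ne {h : List Int} {i k : Nat} (hne : k ≠ i) (v : Int) :
    hGet (h.set i v) k = hGet h k := by
  simp [hGet, List.getD, List.getElem?_set_ne (by omega : i ≠ k)]

theorem length_hSwap (h : List Int) (i j : Nat) : (hSwap h i j).length = h.length := by
  simp [hSwap]

theorem hGet_hSwap_left {h : List Int} {i j : Nat} (hi : i < h.length) (hj : j < h.length) :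
    hGet (hSwap h i j) i = hGet h j := by
  by_cases hij : i = j
  · subst hij; simp [hSwap, hGet_set_eq (by simpa using hi)]
  · simp [hSwap, hGet_set_ne hij, hGet_set_eq hi]

theorem hGet_hSwap_right {h : List Int} {i j : Nat} (hj : j < h.length) :
    hGet (hSwap h i j) j = hGet h i := by
  unfold hSwap
  exact hGet_set_eq (by simpa using hj) _

theorem hGet_hSwap_other {h : List Int} {i j k : Nat} (hki : k ≠ i) (hkj : k ≠ j) :
    hGet (hSwap h i j) k = hGet h k := by
  simp [hSwap, hGet_set_ne hkj, hGet_set_ne hki]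

-- `xs[c] :: xs.set c v` is `v :: xs` up to permutation
theorem head_swap_perm (v : Int) : ∀ (t : List Int) (c : Nat), c < t.length →
    (hGet t c :: t.set c v).Perm (v :: t) := by
  intro t
  induction t with
  | nil => intro c hc; simp at hc
  | cons a ys ih =>
    intro c hc
    cases c with
    | zero => simpa [hGet] using List.Perm.swap v a ys
    | succ c' =>
      have hc' : c' < ys.length := by simpa using hc
      have : (hGet (a :: ys) (c'+1) :: (a :: ys).set (c'+1) v) =
          hGet ys c' :: a :: ys.set c' v := by simp [hGet]
      rw [this]
      exact ((List.Perm.swap a (hGet ys c') _).trans ((ih c' hc').cons a)).trans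
        (List.Perm.swap v a ys)

theorem hSwap_perm : ∀ (h : List Int) (i j : Nat), i < h.length → j < h.length →
    (hSwap h i j).Perm h := by
  intro h
  induction h with
  | nil => intro i j hi; simp at hi
  | cons x t ih =>
    intro i j hi hj
    cases i with
    | zero =>
      cases j with
      | zero => simp [hSwap, hGet]
      | succ m =>
        have hm : m < t.length := by simpa using hj
        have : hSwap (x :: t) 0 (m+1) = hGet t m :: t.set m x := by
          simp [hSwap, hGet]
        rw [this]
        exact head_swap_perm x t m hm
    | succ n =>
      cases j with
      | zero =>
        have hn : n < t.length := by simpa using hi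
        have : hSwap (x :: t) (n+1) 0 = hGet t n :: t.set n x := by
          simp [hSwap, hGet]
        rw [this]
        exact head_swap_perm x t n hn
      | succ m =>
        have hn : n < t.length := by simpa using hi
        have hm : m < t.length := by simpa using hj
        have : hSwap (x :: t) (n+1) (m+1) = x :: hSwap t n m := by
          simp [hSwap, hGet]
        rw [this]
        exact List.Perm.cons x (ih n m hn hm)

-- ---- siftDown lemmas ----
theorem siftDown_perm (h : List Int) (i : Nat) : (siftDown h i).Perm h := by
  fun_induction siftDown h i
  case case1 h i h1 h2 h3 ih => exact ih.trans (hSwap_perm h i (2*i+2) (by omega) (by omega))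
  case case2 => exact List.Perm.refl _
  case case3 h i h1 h2 h3 ih => exact ih.trans (hSwap_perm h i (2*i+1) (by omega) (by omega))
  case case4 => exact List.Perm.refl _
  case case5 => exact List.Perm.refl _

theorem length_siftDown (h : List Int) (i : Nat) : (siftDown h i).length = h.length :=
  (siftDown_perm h i).length_eq

theorem hGet_siftDown_not_desc (h : List Int) (i : Nat) :
    ∀ j, ¬ desc i j → hGet (siftDown h i) j = hGet h j := by
  fun_induction siftDown h i
  case case1 h i h1 h2 h3 ih =>
    intro j hnd
    have hnd2 : ¬ desc (2*i+2) j := fun hd => hnd (desc_trans (desc_child_right i) j hd)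
    rw [ih j hnd2]
    exact hGet_hSwap_other (fun he => hnd (by rw [he]; exact desc_refl i))
      (fun he => hnd (by rw [he]; exact desc_child_right i))
  case case2 => intro j _; rfl
  case case3 h i h1 h2 h3 ih =>
    intro j hnd
    have hnd2 : ¬ desc (2*i+1) j := fun hd => hnd (desc_trans (desc_child_left i) j hd)
    rw [ih j hnd2]
    exact hGet_hSwap_other (fun he => hnd (by rw [he]; exact desc_refl i))
      (fun he => hnd (by rw [he]; exact desc_child_left i))
  case case4 => intro j _; rfl
  case case5 => intro j _; rfl

theorem goodAt_congr {h h' : List Int} {r : Nat} (hlen : h'.length = h.length)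
    (hval : ∀ j, desc r j → j < h.length → hGet h' j = hGet h j)
    (hg : goodAt h r) : goodAt h' r := by
  intro j hdesc hj
  rw [hlen] at hj
  have hok := hg j hdesc hj
  constructor
  · intro hc; rw [hlen] at hc
    rw [hval j hdesc hj, hval _ (desc_trans hdesc _ (desc_child_left j)) hc]
    exact hok.1 hc
  · intro hc; rw [hlen] at hc
    rw [hval j hdesc hj, hval _ (desc_trans hdesc _ (desc_child_right j)) hc]
    exact hok.2 hc

theorem goodAt_mono {h : List Int} {r r' : Nat} (hg : goodAt h r) (hd : desc r r') :
    goodAt h r' := fun j hj => hg j (desc_trans hd j hj)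

theorem goodAt_root_le {h : List Int} {r : Nat} (hg : goodAt h r) :
    ∀ j, desc r j → j < h.length → hGet h r ≤ hGet h j := by
  intro j
  induction j using Nat.strong_induction_on with
  | _ j ih =>
    intro hd hj
    by_cases hje : j = r
    · subst hje; exact le_refl _
    · have hp := desc_parent hd hje
      have hrj : r ≤ j := desc_le hd
      have hj1 : 1 ≤ j := by omega
      have hplt : (j-1)/2 < j := by omega
      have h1 : hGet h r ≤ hGet h ((j-1)/2) := ih _ hplt hp (by omega)
      have hok := hg _ hp (by omega)
      rcases child_parity hj1 with hc | hc
      · have := hok.1 (by omega)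
        rw [← hc] at this
        exact le_trans h1 this
      · have := hok.2 (by omega)
        rw [← hc] at this
        exact le_trans h1 this

theorem siftDown_lb (v : Int) : ∀ (h : List Int) (i : Nat),
    (∀ j, desc i j → j < h.length → v ≤ hGet h j) →
    ∀ j, desc i j → j < (siftDown h i).length → v ≤ hGet (siftDown h i) j := by
  intro h i
  fun_induction siftDown h i
  case case1 h i h1 h2 h3 ih =>
    intro H j hdij hj
    have hi : i < h.length := by omega
    have hclt : 2*i+2 < h.length := h2.1
    have H' : ∀ j', desc (2*i+2) j' → j' < (hSwap h i (2*i+2)).length →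
        v ≤ hGet (hSwap h i (2*i+2)) j' := by
      intro j' hd' hj'
      have hge := desc_le hd'
      by_cases hjc : j' = 2*i+2
      · rw [hjc, hGet_hSwap_right hclt]
        exact H i (desc_refl i) hi
      · rw [hGet_hSwap_other (by omega) hjc]
        exact H j' (desc_trans (desc_child_right i) j' hd')
          (by rw [length_hSwap] at hj'; exact hj')
    by_cases hd : desc (2*i+2) j
    · exact ih H' j hd hj
    · rw [hGet_siftDown_not_desc _ _ j hd]
      have hjlen : j < h.length := by
        rw [length_siftDown, length_hSwap] at hj; exact hj
      by_cases hje : j = i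
      · rw [hje, hGet_hSwap_left hi hclt]
        exact H _ (desc_child_right i) hclt
      · have hjc : j ≠ 2*i+2 := fun he => hd (by rw [he]; exact desc_refl _)
        rw [hGet_hSwap_other hje hjc]
        exact H j hdij hjlen
  case case2 => intro H j hd hj; exact H j hd hj
  case case3 h i h1 h2 h3 ih =>
    intro H j hdij hj
    have hi : i < h.length := by omega
    have hclt : 2*i+1 < h.length := h1
    have H' : ∀ j', desc (2*i+1) j' → j' < (hSwap h i (2*i+1)).length →
        v ≤ hGet (hSwap h i (2*i+1)) j' := by
      intro j' hd' hj'
      have hge := desc_le hd'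
      by_cases hjc : j' = 2*i+1
      · rw [hjc, hGet_hSwap_right hclt]
        exact H i (desc_refl i) hi
      · rw [hGet_hSwap_other (by omega) hjc]
        exact H j' (desc_trans (desc_child_left i) j' hd')
          (by rw [length_hSwap] at hj'; exact hj')
    by_cases hd : desc (2*i+1) j
    · exact ih H' j hd hj
    · rw [hGet_siftDown_not_desc _ _ j hd]
      have hjlen : j < h.length := by
        rw [length_siftDown, length_hSwap] at hj; exact hj
      by_cases hje : j = i
      · rw [hje, hGet_hSwap_left hi hclt]
        exact H _ (desc_child_left i) hclt
      · have hjc : j ≠ 2*i+1 := fun he => hd (by rw [he]; exact desc_refl _)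
        rw [hGet_hSwap_other hje hjc]
        exact H j hdij hjlen
  case case4 => intro H j hd hj; exact H j hd hj
  case case5 => intro H j hd hj; exact H j hd hj

theorem siftDown_good : ∀ (h : List Int) (i : Nat),
    goodAt h (2*i+1) → goodAt h (2*i+2) → goodAt (siftDown h i) i := by
  intro h i
  fun_induction siftDown h i
  case case1 h i h1 h2 h3 ih =>
    intro g1 g2
    have hi : i < h.length := by omega
    have hclt : 2*i+2 < h.length := h2.1
    have hlenS : (hSwap h i (2*i+2)).length = h.length := length_hSwap h i (2*i+2)
    have hlenG : (siftDown (hSwap h i (2*i+2)) (2*i+2)).length = h.length := by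
      rw [length_siftDown, hlenS]
    -- values in the subtrees of 2*i+2's children are untouched by the swap
    have hswval : ∀ r, (∀ j', desc r j' → 2*i+2 < j') →
        ∀ j', desc r j' → j' < h.length → hGet (hSwap h i (2*i+2)) j' = hGet h j' := by
      intro r hr j' hd' _
      have := hr j' hd'
      exact hGet_hSwap_other (by omega) (by omega)
    have sub1 : goodAt (hSwap h i (2*i+2)) (2*(2*i+2)+1) := by
      apply goodAt_congr hlenS
      · exact hswval _ (fun j' hd' => by have := desc_le hd'; omega)
      · exact goodAt_mono g2 (desc_child_left (2*i+2))
    have sub2 : goodAt (hSwap h i (2*i+2)) (2*(2*i+2)+2) := by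
      apply goodAt_congr hlenS
      · exact hswval _ (fun j' hd' => by have := desc_le hd'; omega)
      · exact goodAt_mono g2 (desc_child_right (2*i+2))
    have hgc : goodAt (siftDown (hSwap h i (2*i+2)) (2*i+2)) (2*i+2) := ih sub1 sub2
    have lb : ∀ j, desc (2*i+2) j → j < (siftDown (hSwap h i (2*i+2)) (2*i+2)).length →
        hGet h (2*i+2) ≤ hGet (siftDown (hSwap h i (2*i+2)) (2*i+2)) j := by
      apply siftDown_lb
      intro j' hd' hj'
      by_cases hjc : j' = 2*i+2
      · rw [hjc, hGet_hSwap_right hclt]; omega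
      · have := desc_le hd'
        rw [hGet_hSwap_other (by omega) hjc]
        exact goodAt_root_le g2 j' hd' (by rw [length_hSwap] at hj'; exact hj')
    have hgi : hGet (siftDown (hSwap h i (2*i+2)) (2*i+2)) i = hGet h (2*i+2) := by
      rw [hGet_siftDown_not_desc _ _ i (fun hd => by have := desc_le hd; omega),
        hGet_hSwap_left hi hclt]
    -- the untouched sibling subtree 2*i+1
    have gsib : goodAt (siftDown (hSwap h i (2*i+2)) (2*i+2)) (2*i+1) := by
      refine goodAt_congr (h := h) hlenG ?_ g1
      intro j' hd' hj'
      have hnd : ¬ desc (2*i+2) j' := by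
        intro hcd
        rcases desc_linear j' hcd hd' with hx | hx
        · exact not_desc_sibling_rl i hx
        · exact not_desc_sibling_lr i hx
      rw [hGet_siftDown_not_desc _ _ j' hnd]
      have := desc_le hd'
      exact hGet_hSwap_other (by omega) (fun he => hnd (by rw [he]; exact desc_refl _))
    intro j hd hj
    by_cases hje : j = i
    · subst hje
      constructor
      · intro hc
        rw [hlenG] at hc
        have hnd : ¬ desc (2*j+2) (2*j+1) := not_desc_sibling_rl j
        rw [hgi, hGet_siftDown_not_desc _ _ _ hnd,
          hGet_hSwap_other (by omega) (by omega)]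
        omega
      · intro hc
        rw [hgi]
        exact lb (2*j+2) (desc_refl _) hc
    · rcases desc_cases j hd hje with hl | hr
      · exact gsib j hl hj
      · exact hgc j hr hj
  case case2 h i h1 h2 h3 =>
    intro g1 g2 j hd hj
    by_cases hje : j = i
    · subst hje
      refine ⟨fun hc => ?_, fun hc => ?_⟩ <;> omega
    · rcases desc_cases j hd hje with hl | hr
      · exact g1 j hl hj
      · exact g2 j hr hj
  case case3 h i h1 h2 h3 ih =>
    intro g1 g2
    have hi : i < h.length := by omega
    have hclt : 2*i+1 < h.length := h1
    have hlenS : (hSwap h i (2*i+1)).length = h.length := length_hSwap h i (2*i+1)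
    have hlenG : (siftDown (hSwap h i (2*i+1)) (2*i+1)).length = h.length := by
      rw [length_siftDown, hlenS]
    have hswval : ∀ r, (∀ j', desc r j' → 2*i+1 < j') →
        ∀ j', desc r j' → j' < h.length → hGet (hSwap h i (2*i+1)) j' = hGet h j' := by
      intro r hr j' hd' _
      have := hr j' hd'
      exact hGet_hSwap_other (by omega) (by omega)
    have sub1 : goodAt (hSwap h i (2*i+1)) (2*(2*i+1)+1) := by
      apply goodAt_congr hlenS
      · exact hswval _ (fun j' hd' => by have := desc_le hd'; omega)
      · exact goodAt_mono g1 (desc_child_left (2*i+1))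
    have sub2 : goodAt (hSwap h i (2*i+1)) (2*(2*i+1)+2) := by
      apply goodAt_congr hlenS
      · exact hswval _ (fun j' hd' => by have := desc_le hd'; omega)
      · exact goodAt_mono g1 (desc_child_right (2*i+1))
    have hgc : goodAt (siftDown (hSwap h i (2*i+1)) (2*i+1)) (2*i+1) := ih sub1 sub2
    have lb : ∀ j, desc (2*i+1) j → j < (siftDown (hSwap h i (2*i+1)) (2*i+1)).length →
        hGet h (2*i+1) ≤ hGet (siftDown (hSwap h i (2*i+1)) (2*i+1)) j := by
      apply siftDown_lb
      intro j' hd' hj'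
      by_cases hjc : j' = 2*i+1
      · rw [hjc, hGet_hSwap_right hclt]; omega
      · have := desc_le hd'
        rw [hGet_hSwap_other (by omega) hjc]
        exact goodAt_root_le g1 j' hd' (by rw [length_hSwap] at hj'; exact hj')
    have hgi : hGet (siftDown (hSwap h i (2*i+1)) (2*i+1)) i = hGet h (2*i+1) := by
      rw [hGet_siftDown_not_desc _ _ i (fun hd => by have := desc_le hd; omega),
        hGet_hSwap_left hi hclt]
    have gsib : goodAt (siftDown (hSwap h i (2*i+1)) (2*i+1)) (2*i+2) := by
      refine goodAt_congr (h := h) hlenG ?_ g2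
      intro j' hd' hj'
      have hnd : ¬ desc (2*i+1) j' := by
        intro hcd
        rcases desc_linear j' hcd hd' with hx | hx
        · exact not_desc_sibling_lr i hx
        · exact not_desc_sibling_rl i hx
      rw [hGet_siftDown_not_desc _ _ j' hnd]
      have := desc_le hd'
      exact hGet_hSwap_other (by omega) (fun he => hnd (by rw [he]; exact desc_refl _))
    intro j hd hj
    by_cases hje : j = i
    · subst hje
      constructor
      · intro hc
        rw [hgi]
        exact lb (2*j+1) (desc_refl _) hc
      · intro hc
        rw [hlenG] at hc
        have hnd : ¬ desc (2*j+1) (2*j+2) := not_desc_sibling_lr j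
        rw [hgi, hGet_siftDown_not_desc _ _ _ hnd,
          hGet_hSwap_other (by omega) (by omega)]
        omega
    · rcases desc_cases j hd hje with hl | hr
      · exact hgc j hl hj
      · exact gsib j hr hj
  case case4 h i h1 h2 h3 =>
    intro g1 g2 j hd hj
    by_cases hje : j = i
    · subst hje
      refine ⟨fun hc => ?_, fun hc => ?_⟩ <;> omega
    · rcases desc_cases j hd hje with hl | hr
      · exact g1 j hl hj
      · exact g2 j hr hj
  case case5 h i h1 =>
    intro g1 g2 j hd hj
    by_cases hje : j = i
    · subst hje
      refine ⟨fun hc => ?_, fun hc => ?_⟩ <;> omega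
    · rcases desc_cases j hd hje with hl | hr
      · have := desc_le hl; omega
      · have := desc_le hr; omega

-- ---- heapify lemmas ----
theorem heapifyAux_perm : ∀ (i : Nat) (h : List Int), (heapifyAux h i).Perm h := by
  intro i
  induction i with
  | zero => intro h; simp [heapifyAux]
  | succ i ih =>
    intro h
    exact (ih (siftDown h i)).trans (siftDown_perm h i)

theorem heapifyAux_good : ∀ (i : Nat) (h : List Int),
    (∀ k, i ≤ k → goodAt h k) → Good (heapifyAux h i) := by
  intro i
  induction i with
  | zero =>
    intro h hg j hj
    exact hg j (Nat.zero_le _) j (desc_refl j) hj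
  | succ i ih =>
    intro h hg
    apply ih
    intro k hk
    have hgood_i : goodAt (siftDown h i) i :=
      siftDown_good h i (hg _ (by omega)) (hg _ (by omega))
    by_cases hd : desc i k
    · exact goodAt_mono hgood_i hd
    · have hki : k ≠ i := fun he => hd (he ▸ desc_refl i)
      apply goodAt_congr (length_siftDown h i)
      · intro j hdj hj
        apply hGet_siftDown_not_desc
        intro hij
        rcases desc_linear j hij hdj with hik | hki
        · exact hd hik
        · have := desc_le hki
          omega
      · exact hg k (by omega)

theorem heapify_perm (h : List Int) : (heapify h).Perm h := heapifyAux_perm _ h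

theorem heapify_good (h : List Int) : Good (heapify h) := by
  apply heapifyAux_good
  intro k hk j hdj hj
  have hkj : k ≤ j := desc_le hdj
  constructor
  · intro hc; omega
  · intro hc; omega

-- ---- siftUp lemmas ----
def upInv (h : List Int) (i : Nat) : Prop :=
  (∀ p j, j < h.length → (j = 2*p+1 ∨ j = 2*p+2) → j ≠ i → hGet h p ≤ hGet h j) ∧
  (∀ j, j < h.length → (j = 2*i+1 ∨ j = 2*i+2) → 1 ≤ i → hGet h ((i-1)/2) ≤ hGet h j)

theorem siftUp_perm : ∀ (h : List Int) (i : Nat), i < h.length → (siftUp h i).Perm h := by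
  intro h i
  fun_induction siftUp h i
  case case1 h i hcond ih =>
    intro hi
    have hp : (i-1)/2 < h.length := by omega
    exact (ih (by rw [length_hSwap]; omega)).trans (hSwap_perm h ((i-1)/2) i hp hi)
  case case2 => intro _; exact List.Perm.refl _

theorem siftUp_good : ∀ (h : List Int) (i : Nat), i < h.length → upInv h i →
    Good (siftUp h i) := by
  intro h i
  fun_induction siftUp h i
  case case2 h i hcond =>
    intro hi hinv p hp
    constructor
    · intro hc
      by_cases hne : 2*p+1 = i
      · subst hne
        have hix : (2*p+1-1)/2 = p := by omega
        rw [hix] at hcond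
        omega
      · exact hinv.1 p (2*p+1) hc (Or.inl rfl) hne
    · intro hc
      by_cases hne : 2*p+2 = i
      · subst hne
        have hix : (2*p+2-1)/2 = p := by omega
        rw [hix] at hcond
        omega
      · exact hinv.1 p (2*p+2) hc (Or.inr rfl) hne
  case case1 h i hcond ih =>
    intro hi hinv
    have h0i : 0 < i := hcond.1
    have hlt : hGet h i < hGet h ((i-1)/2) := hcond.2
    have hplt : (i-1)/2 < i := by omega
    have hp : (i-1)/2 < h.length := by omega
    have hlenS : (hSwap h ((i-1)/2) i).length = h.length := length_hSwap _ _ _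
    apply ih (by omega)
    constructor
    · intro q j hj hcj hne
      rw [hlenS] at hj
      have hqj : q = (j-1)/2 := by omega
      have hq : q < h.length := by omega
      by_cases hji : j = i
      · have hqp : q = (i-1)/2 := by omega
        rw [hji, hqp, hGet_hSwap_right hi, hGet_hSwap_left hp hi]
        omega
      · rw [hGet_hSwap_other (fun he => hne (by omega)) hji]
        by_cases hqp : q = (i-1)/2
        · rw [hqp, hGet_hSwap_left hp hi]
          have := hinv.1 ((i-1)/2) j hj (by omega) hji
          omega
        · by_cases hqi : q = i
          · rw [hqi, hGet_hSwap_right hi]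
            exact hinv.2 j hj (by omega) (by omega)
          · rw [hGet_hSwap_other hqp hqi]
            exact hinv.1 q j hj hcj hji
    · intro j hj hcj hp1
      rw [hlenS] at hj
      have hpp : ((i-1)/2-1)/2 < (i-1)/2 := by omega
      rw [hGet_hSwap_other (by omega) (by omega)]
      have hstep : hGet h (((i-1)/2-1)/2) ≤ hGet h ((i-1)/2) :=
        hinv.1 _ ((i-1)/2) hp (child_parity hp1) (by omega)
      by_cases hji : j = i
      · rw [hji, hGet_hSwap_right hi]
        omega
      · rw [hGet_hSwap_other (fun he => by omega) hji]
        have := hinv.1 ((i-1)/2) j hj hcj hji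
        omega

-- ---- heappush spec ----
theorem heappush_perm {h : List Int} (x : Int) : (heappush h x).Perm (x :: h) := by
  unfold heappush
  have h1 : (siftUp (h ++ [x]) h.length).Perm (h ++ [x]) :=
    siftUp_perm _ _ (by simp)
  exact h1.trans (List.perm_append_singleton x h)

theorem hGet_append_lt {h : List Int} {j : Nat} (hj : j < h.length) (x : Int) :
    hGet (h ++ [x]) j = hGet h j := by
  simp [hGet, List.getD, List.getElem?_append_left hj]

theorem heappush_good {h : List Int} (hg : Good h) (x : Int) : Good (heappush h x) := by
  apply siftUp_good _ _ (by simp)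
  constructor
  · intro p j hj hcj hne
    have hjlen : j < h.length := by
      simp at hj; omega
    have hplen : p < h.length := by omega
    rw [hGet_append_lt hjlen, hGet_append_lt hplen]
    have := hg p hplen
    rcases hcj with hc | hc
    · subst hc; exact this.1 (by omega)
    · subst hc; exact this.2 (by omega)
  · intro j hj hcj _
    simp at hj
    omega

-- ---- heappop spec ----
theorem hGet_dropLast {h : List Int} {j : Nat} (hj : j < h.length - 1) :
    hGet h.dropLast j = hGet h j := by
  simp only [hGet, List.getD, List.getElem?_dropLast]
  rw [if_pos hj]

theorem heappop_spec {h : List Int} (hne : h ≠ []) (hg : Good h) :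
    (heappop h).1 = hGet h 0 ∧ Good (heappop h).2 ∧ h.Perm ((heappop h).1 :: (heappop h).2) := by
  have hpos : 0 < h.length := List.length_pos_of_ne_nil hne
  unfold heappop
  by_cases hemp : h.dropLast.isEmpty
  · simp only [hemp, if_pos]
    have hlen1 : h.length = 1 := by
      have := List.isEmpty_iff.mp hemp
      have : h.dropLast.length = 0 := by rw [this]; rfl
      simp at this
      omega
    refine ⟨by rw [hlen1], fun j hj => by simp at hj, ?_⟩
    rw [hlen1]
    rcases h with _ | ⟨x, t⟩
    · simp at hpos
    · have ht2 : t = [] := by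
        have : t.length = 0 := by simp only [List.length_cons] at hlen1; omega
        exact List.length_eq_zero_iff.mp this
      subst ht2
      exact List.Perm.refl _
  · simp only [hemp, if_neg, Bool.false_eq_true, not_false_iff]
    have hrlen : h.dropLast.length = h.length - 1 := by simp
    have hrpos : 0 < h.dropLast.length := by
      rcases Nat.eq_or_lt_of_le hpos with h1 | h1
      · exfalso; apply hemp
        rw [List.isEmpty_iff]
        have : h.dropLast.length = 0 := by omega
        exact List.length_eq_zero_iff.mp this
      · omega
    have hlen2 : 2 ≤ h.length := by omega
    set last := hGet h (h.length - 1) with hlast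
    set h0 := h.dropLast.set 0 last with hh0
    have hlenh0 : h0.length = h.length - 1 := by rw [hh0]; simp
    -- values at positions ≥ 1 agree with h
    have hval : ∀ j, 1 ≤ j → j < h0.length → hGet h0 j = hGet h j := by
      intro j h1 h2
      rw [hh0, hGet_set_ne (by omega), hGet_dropLast (by omega)]
    have hga : ∀ r, 1 ≤ r → goodAt h0 r := by
      intro r hr j hd hj
      have hj1 : 1 ≤ j := le_trans hr (desc_le hd)
      constructor
      · intro hc
        rw [hval j hj1 hj, hval _ (by omega) hc]
        exact (hg j (by omega)).1 (by omega)
      · intro hc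
        rw [hval j hj1 hj, hval _ (by omega) hc]
        exact (hg j (by omega)).2 (by omega)
    have hgood : Good (siftDown h0 0) := by
      intro j hj
      exact siftDown_good h0 0 (hga 1 (by omega)) (hga 2 (by omega)) j (desc_zero j) hj
    refine ⟨?_, hgood, ?_⟩
    · exact hGet_dropLast (by omega)
    · -- h ~ hGet h.dropLast 0 :: siftDown h0 0
      have p1 : (siftDown h0 0).Perm h0 := siftDown_perm h0 0
      have p2 : (hGet h.dropLast 0 :: h0).Perm (last :: h.dropLast) :=
        head_swap_perm last h.dropLast 0 hrpos
      have p3 : (last :: h.dropLast).Perm (h.dropLast ++ [last]) :=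
        (List.perm_append_singleton last h.dropLast).symm
      have hlastget : last = h.getLast hne := by
        rw [hlast, List.getLast_eq_getElem]
        exact List.getD_eq_getElem h 0 (by omega)
      have heq : h.dropLast ++ [last] = h := by
        rw [hlastget]
        exact List.dropLast_append_getLast hne
      have hchain : (hGet h.dropLast 0 :: siftDown h0 0).Perm (h.dropLast ++ [last]) :=
        ((p1.cons _).trans p2).trans p3
      rw [heq] at hchain
      exact hchain.symm

-- ---- B-side lemmas ----
theorem insSorted_perm (x : Int) : ∀ (s : List Int), (insSorted x s).Perm (x :: s) := by
  intro s
  induction s with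
  | nil => simp [insSorted]
  | cons y ys ih =>
    rw [insSorted]
    split
    · exact (List.Perm.cons y ih).trans (List.Perm.swap x y ys)
    · exact List.Perm.refl _

theorem mem_insSorted {x z : Int} : ∀ {s : List Int}, z ∈ insSorted x s → z = x ∨ z ∈ s := by
  intro s hz
  have := (insSorted_perm x s).mem_iff.mp hz
  simpa using this

theorem insSorted_sorted (x : Int) : ∀ {s : List Int}, s.Pairwise (· ≤ ·) →
    (insSorted x s).Pairwise (· ≤ ·) := by
  intro s
  induction s with
  | nil => intro _; simp [insSorted]
  | cons y ys ih =>
    intro hs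
    rw [List.pairwise_cons] at hs
    rw [insSorted]
    split
    · rename_i hyx
      rw [List.pairwise_cons]
      constructor
      · intro z hz
        rcases mem_insSorted hz with hzx | hzy
        · subst hzx; omega
        · exact hs.1 z hzy
      · exact ih hs.2
    · rename_i hyx
      rw [List.pairwise_cons]
      constructor
      · intro z hz
        simp at hz
        rcases hz with hzy | hzy
        · omega
        · have := hs.1 z hzy; omega
      · exact List.pairwise_cons.mpr hs

-- minimum of a good heap is at the root; in a sorted list it is the head
theorem min_eq {h s : List Int} (hg : Good h) (hne : h ≠ [])
    (hsort : s.Pairwise (· ≤ ·)) (hp : h.Perm s) : hGet h 0 = s.getD 0 0 := by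
  rcases s with _ | ⟨m, ts⟩
  · exact absurd hp.eq_nil hne
  rcases h with _ | ⟨x, t⟩
  · exact absurd rfl hne
  have hroot : ∀ y ∈ (x :: t), x ≤ y := by
    intro y hy
    obtain ⟨k, hk, he⟩ := List.getElem_of_mem hy
    have h1 : hGet (x :: t) 0 ≤ hGet (x :: t) k :=
      goodAt_root_le (fun j _ hj => hg j hj) k (desc_zero k) hk
    have h2 : hGet (x :: t) k = y := by
      show (x :: t).getD k 0 = y
      rw [List.getD_eq_getElem _ 0 hk]; exact he
    rw [h2] at h1
    exact h1
  have hxm : x ≤ m := hroot m (hp.mem_iff.mpr (List.mem_cons_self))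
  have hmx : m ≤ x := by
    have hxs : x ∈ m :: ts := hp.subset (List.mem_cons_self)
    rcases List.mem_cons.mp hxs with he | ht
    · omega
    · exact (List.pairwise_cons.mp hsort).1 x ht
  show x = m
  omega

-- ---- main simulation ----
theorem sim (K : Int) : ∀ (fuel : Nat) (h s : List Int) (ans : Int),
    Good h → s.Pairwise (· ≤ ·) → h.Perm s → h ≠ [] →
    loopA K fuel h ans = loopB K fuel s ans := by
  intro fuel
  induction fuel with
  | zero => intro h s ans _ _ _ _; rfl
  | succ fuel ih =>
    intro h s ans hg hsort hp hne
    have hmin : hGet h 0 = s.getD 0 0 := min_eq hg hne hsort hp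
    have hlen : h.length = s.length := hp.length_eq
    simp only [loopA, loopB]
    rw [hmin, hlen]
    by_cases hc : s.getD 0 0 < K
    · rw [if_pos hc, if_pos hc]
      by_cases hl : s.length < 2
      · rw [if_pos hl, if_pos hl]
      · rw [if_neg hl, if_neg hl]
        rcases s with _ | ⟨a, s'⟩
        · exact absurd hp.eq_nil hne
        rcases s' with _ | ⟨b, rest⟩
        · exfalso; simp at hl
        obtain ⟨hf1, hg1, hp1⟩ := heappop_spec hne hg
        have ha : (heappop h).1 = a := by rw [hf1, hmin]; rfl
        have hlen1 : h.length = (heappop h).2.length + 1 := by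
          have := hp1.length_eq; simpa using this
        have hne1 : (heappop h).2 ≠ [] := by
          intro he; rw [he] at hlen1; simp at hlen1; omega
        have hph1 : (heappop h).2.Perm (b :: rest) := by
          have hx : ((heappop h).1 :: (heappop h).2).Perm (a :: b :: rest) := hp1.symm.trans hp
          rw [ha] at hx
          exact hx.cons_inv
        have hsort1 : (b :: rest).Pairwise (· ≤ ·) := List.Pairwise.of_cons hsort
        obtain ⟨hf2, hg2, hp2⟩ := heappop_spec hne1 hg1
        have hb : (heappop (heappop h).2).1 = b := by
          rw [hf2]
          exact min_eq hg1 hne1 hsort1 hph1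
        have hph2 : (heappop (heappop h).2).2.Perm rest := by
          have hx : ((heappop (heappop h).2).1 :: (heappop (heappop h).2).2).Perm (b :: rest) :=
            hp2.symm.trans hph1
          rw [hb] at hx
          exact hx.cons_inv
        rw [ha, hb]
        apply ih
        · exact heappush_good hg2 _
        · exact insSorted_sorted _ (List.Pairwise.of_cons hsort1)
        · exact (heappush_perm _).trans ((hph2.cons _).trans (insSorted_perm _ rest).symm)
        · intro he
          have hx := (heappush_perm (h := (heappop (heappop h).2).2) (a + b * 2)).length_eq
          rw [he] at hx
          simp at hx
    · rw [if_neg hc, if_neg hc]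

-- ===== VERDICT (by name: the statement is the Claim_ definition above) =====
theorem solution_spec : Claim_equal_solution := by
  intro scoville K _ hpre
  unfold Spec_solution solution solution_alt
  apply sim
  · exact heapify_good scoville
  · exact PySem.List.sorted_pairwise scoville (fun x => x)
  · exact (heapify_perm scoville).trans
      (PySem.List.sorted_perm scoville (fun x => x) false).symm
  · intro he
    have hx := (heapify_perm scoville).length_eq
    rw [he] at hx
    exact hpre (List.length_eq_zero_iff.mp hx.symm)
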